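-- pv_equiv track=rewrite | github.com/guswns3371/Algorithm | 프로그래머스/2/340211. ［PCCP 기출문제］ 3번 ／ 충돌위험 찾기/［PCCP 기출문제］ 3번 ／ 충돌위험 찾기.py | find_best_route
-- ===== SOURCE A (Python) =====
-- def find_best_route(points, route):
--     q = []
--     time = 0
--
--     for i in range(len(route) - 1):
--         sx, sy = points[route[i] - 1]
--         ex, ey = points[route[i + 1] - 1]
--         # x 먼저 조절
--         while sx != ex:
--             q.append((sx, sy, time))
--             if sx < ex:
--                 sx += 1
--             else:
--                 sx -= 1
--             time += 1
--
--         # y 그 다음 조절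
--         while sy != ey:
--             q.append((sx, sy, time))
--             if sy < ey:
--                 sy += 1
--             else:
--                 sy -= 1
--             time += 1
--
--     q.append((sx, sy, time))
--     return q
-- ===== SOURCE B (Python) =====
-- def find_best_route(points, route):
--     # closed-form: precompute prefix sums of leg lengths, then map each global
--     # timestamp t directly to its position arithmetically (no unit stepping).
--     legs = []
--     cum = [0]
--     for a, b in zip(route, route[1:]):
--         sx, sy = points[a - 1]
--         ex, ey = points[b - 1]
--         legs.append((sx, sy, ex, ey))
--         cum.append(cum[-1] + abs(ex - sx) + abs(ey - sy))
--
--     def pos(t):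
--         i = len(legs) - 1
--         while i > 0 and cum[i] > t:
--             i -= 1
--         sx, sy, ex, ey = legs[i]
--         k = t - cum[i]
--         dx = abs(ex - sx)
--         if k < dx:
--             return (sx + (k if ex > sx else -k), sy)
--         return (ex, sy + (k - dx if ey > sy else dx - k))
--
--     return [pos(t) + (t,) for t in range(cum[-1] + 1)]
-- ===== Notes on version B (the rewrite author's own statement) =====
-- stated objective: alternative
-- what changed: B never walks the grid: it precomputes prefix sums of leg lengths and maps each global timestamp t directly to its (x,y) by locating t's leg in the prefix-sum table and computing the coordinate arithmetically, instead of A's unit-step simulation with a mutable time counter.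
import Mathlib
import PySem

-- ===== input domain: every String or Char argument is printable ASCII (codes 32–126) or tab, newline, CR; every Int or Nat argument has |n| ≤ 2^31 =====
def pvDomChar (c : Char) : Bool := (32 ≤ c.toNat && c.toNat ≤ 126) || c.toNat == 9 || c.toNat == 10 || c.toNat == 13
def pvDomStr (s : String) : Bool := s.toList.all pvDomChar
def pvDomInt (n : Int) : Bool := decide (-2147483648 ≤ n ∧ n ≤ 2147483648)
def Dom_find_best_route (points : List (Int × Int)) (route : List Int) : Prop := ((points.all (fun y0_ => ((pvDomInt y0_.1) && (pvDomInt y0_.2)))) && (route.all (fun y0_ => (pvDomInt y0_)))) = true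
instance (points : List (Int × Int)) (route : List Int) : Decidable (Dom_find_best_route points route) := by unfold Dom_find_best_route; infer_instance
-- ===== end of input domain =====

-- B replaces A's unit-step walk with prefix sums of leg lengths plus a direct
-- timestamp→position arithmetic lookup; same output, different algorithm.

-- ===== PORT A =====
-- 'while sx != ex: q.append((sx, sy, time)); sx += ±1; time += 1' — returns (final sx, time, q)
def legX (ex sy : Int) (sx time : Int) (q : List (Int × Int × Int)) : Int × Int × List (Int × Int × Int) :=
  if sx = ex then (sx, time, q)
  else legX ex sy (if sx < ex then sx + 1 else sx - 1) (time + 1) (q ++ [(sx, sy, time)])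
termination_by (ex - sx).natAbs
decreasing_by split_ifs <;> omega

-- the second while loop, adjusting y with x already equal to ex
def legY (ey sx : Int) (sy time : Int) (q : List (Int × Int × Int)) : Int × Int × List (Int × Int × Int) :=
  if sy = ey then (sy, time, q)
  else legY ey sx (if sy < ey then sy + 1 else sy - 1) (time + 1) (q ++ [(sx, sy, time)])
termination_by (ey - sy).natAbs
decreasing_by split_ifs <;> omega

-- one iteration of A's for-loop; state = (sx, sy, time, q)
def stepA (points : List (Int × Int)) (route : List Int)
    (st : Int × Int × Int × List (Int × Int × Int)) (i : Nat) :
    Int × Int × Int × List (Int × Int × Int) :=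
  let s := PySem.List.pyGetD points (PySem.List.pyGetD route (i : Int) 0 - 1) (0, 0)
  let e := PySem.List.pyGetD points (PySem.List.pyGetD route ((i : Int) + 1) 0 - 1) (0, 0)
  let r1 := legX e.1 s.2 s.1 st.2.2.1 st.2.2.2
  let r2 := legY e.2 r1.1 s.2 r1.2.1 r1.2.2
  (r1.1, r2.1, r2.2.1, r2.2.2)

def find_best_route (points : List (Int × Int)) (route : List Int) : List (Int × Int × Int) :=
  let st := (List.range (route.length - 1)).foldl (stepA points route) (0, 0, 0, [])
  st.2.2.2 ++ [(st.1, st.2.1, st.2.2.1)]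

-- ===== PORT B =====
-- one iteration of B's leg/prefix-sum building loop over zip(route, route[1:]);
-- state = (legs, cum); cum[-1] via pyGetD (cum is never empty)
def stepB (points : List (Int × Int)) (st : List (Int × Int × Int × Int) × List Int)
    (ab : Int × Int) : List (Int × Int × Int × Int) × List Int :=
  let s := PySem.List.pyGetD points (ab.1 - 1) (0, 0)
  let e := PySem.List.pyGetD points (ab.2 - 1) (0, 0)
  (st.1 ++ [(s.1, s.2, e.1, e.2)],
   st.2 ++ [PySem.List.pyGetD st.2 (-1) 0 + |e.1 - s.1| + |e.2 - s.2|])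

-- 'i = len(legs) - 1; while i > 0 and cum[i] > t: i -= 1' — countdown scan
def scanIdx (cum : List Int) (t : Int) : Nat → Nat
  | 0 => 0
  | i + 1 => if PySem.List.pyGetD cum ((i : Int) + 1) 0 > t then scanIdx cum t i else i + 1

-- B's pos(t): locate t's leg in the prefix-sum table, then compute arithmetically
def posB (legs : List (Int × Int × Int × Int)) (cum : List Int) (t : Int) : Int × Int :=
  let i := scanIdx cum t (legs.length - 1)
  let g := PySem.List.pyGetD legs ((i : Nat) : Int) (0, 0, 0, 0)
  let k := t - PySem.List.pyGetD cum ((i : Nat) : Int) 0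
  let dx := |g.2.2.1 - g.1|
  if k < dx then (g.1 + (if g.2.2.1 > g.1 then k else -k), g.2.1)
  else (g.2.2.1, g.2.1 + (if g.2.2.2 > g.2.1 then k - dx else dx - k))

def find_best_route_alt (points : List (Int × Int)) (route : List Int) : List (Int × Int × Int) :=
  -- route[1:] is route.drop 1 (exact: slice with nonnegative start)
  let st := (route.zip (route.drop 1)).foldl (stepB points) ([], [0])
  (PySem.List.pyRange 0 (PySem.List.pyGetD st.2 (-1) 0 + 1) 1).map
    (fun t => ((posB st.1 st.2 t).1, (posB st.1 st.2 t).2, t))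

-- ===== PRECONDITION & SPEC =====
-- Pre_ excludes: routes of length < 2, on which the Python A raises NameError (sx/ex unbound at
-- the final append; B raises IndexError there too), and route entries whose index points[r-1] is
-- out of range, where both raise IndexError.
def Pre_find_best_route (points : List (Int × Int)) (route : List Int) : Prop :=
  2 ≤ route.length ∧ ∀ r ∈ route, PySem.Raise.InRange points.length (r - 1)
instance (points : List (Int × Int)) (route : List Int) : Decidable (Pre_find_best_route points route) := by unfold Pre_find_best_route; infer_instance

def pvWitness_find_best_route : (List (Int × Int)) × List Int := ([(1, 2), (4, 1)], [1, 2])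

def Spec_find_best_route (points : List (Int × Int)) (route : List Int) (out : List (Int × Int × Int)) : Prop := out = find_best_route_alt points route
instance (points : List (Int × Int)) (route : List Int) (out : List (Int × Int × Int)) : Decidable (Spec_find_best_route points route out) := by unfold Spec_find_best_route; infer_instance

-- ===== CLAIM (what is proved, stated in full; the proofs are below) =====
def Claim_equal_find_best_route : Prop := ∀ (points : List (Int × Int)) (route : List Int), Dom_find_best_route points route → Pre_find_best_route points route → Spec_find_best_route points route (find_best_route points route)


-- ===== LEMMAS AND PROOFS =====

-- stamp t ps = positions ps timestamped t, t+1, …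
def stamp : Int → List (Int × Int) → List (Int × Int × Int)
  | _, [] => []
  | t, p :: ps => (p.1, p.2, t) :: stamp (t + 1) ps

-- the x-then-y unit path of one leg, as position lists
def legPositions (sx sy ex ey : Int) : List (Int × Int) :=
  (PySem.List.pyRange sx ex (if ex > sx then 1 else -1)).map (fun x => (x, sy)) ++
  (PySem.List.pyRange sy ey (if ey > sy then 1 else -1)).map (fun y => (ex, y))

def legOf (points : List (Int × Int)) (ab : Int × Int) : Int × Int × Int × Int :=
  let s := PySem.List.pyGetD points (ab.1 - 1) (0, 0)
  let e := PySem.List.pyGetD points (ab.2 - 1) (0, 0)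
  (s.1, s.2, e.1, e.2)

def posList (l : Int × Int × Int × Int) : List (Int × Int) := legPositions l.1 l.2.1 l.2.2.1 l.2.2.2
def pathOf (legs : List (Int × Int × Int × Int)) : List (Int × Int) := legs.flatMap posList
def lenLeg (l : Int × Int × Int × Int) : Int := |l.2.2.1 - l.1| + |l.2.2.2 - l.2.1|
def endPt (legs : List (Int × Int × Int × Int)) : Int × Int := (legs.getLastD (0,0,0,0)).2.2

def cumTail : Int → List (Int × Int × Int × Int) → List Int
  | _, [] => []
  | c, l :: ls => (c + lenLeg l) :: cumTail (c + lenLeg l) ls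

-- A's loop body, re-expressed on the (route[i], route[i+1]) pair
def stepAp (points : List (Int × Int)) (st : Int × Int × Int × List (Int × Int × Int))
    (ab : Int × Int) : Int × Int × Int × List (Int × Int × Int) :=
  let s := PySem.List.pyGetD points (ab.1 - 1) (0, 0)
  let e := PySem.List.pyGetD points (ab.2 - 1) (0, 0)
  let r1 := legX e.1 s.2 s.1 st.2.2.1 st.2.2.2
  let r2 := legY e.2 r1.1 s.2 r1.2.1 r1.2.2
  (r1.1, r2.1, r2.2.1, r2.2.2)

theorem stamp_append (t : Int) (ps qs : List (Int × Int)) :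
    stamp t (ps ++ qs) = stamp t ps ++ stamp (t + ps.length) qs := by
  induction ps generalizing t with
  | nil => simp [stamp]
  | cons p ps ih =>
      simp only [List.cons_append, stamp, ih, List.length_cons]
      congr 2
      push_cast; ring

theorem length_stamp (t : Int) (ps : List (Int × Int)) : (stamp t ps).length = ps.length := by
  induction ps generalizing t with
  | nil => rfl
  | cons p ps ih => simp [stamp, ih]

theorem getElem_stamp (t : Int) (ps : List (Int × Int)) (j : Nat) (h : j < ps.length) :
    (stamp t ps)[j]'(by rw [length_stamp]; exact h) = (ps[j].1, ps[j].2, t + j) := by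
  induction ps generalizing t j with
  | nil => simp at h
  | cons p ps ih =>
      cases j with
      | zero => simp [stamp]
      | succ j =>
          have h' : j < ps.length := by simpa using h
          simp only [stamp, List.getElem_cons_succ]
          rw [ih (t + 1) j h']
          simp only [Prod.mk.injEq, true_and]
          push_cast; ring

theorem length_posList_int (l : Int × Int × Int × Int) : ((posList l).length : Int) = lenLeg l := by
  obtain ⟨a, b, c, d⟩ := l
  unfold posList legPositions lenLeg
  simp only [List.length_append, List.length_map]
  by_cases h1 : c > a <;> by_cases h2 : d > b <;>
    simp only [h1, h2, if_true, if_false,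
      PySem.List.length_pyRange_one, PySem.List.length_pyRange_neg_one] <;>
    push_cast <;>
    [rw [abs_of_nonneg (by omega : (0:Int) ≤ c - a), abs_of_nonneg (by omega : (0:Int) ≤ d - b)];
     rw [abs_of_nonneg (by omega : (0:Int) ≤ c - a), abs_of_nonpos (by omega : d - b ≤ (0:Int))];
     rw [abs_of_nonpos (by omega : c - a ≤ (0:Int)), abs_of_nonneg (by omega : (0:Int) ≤ d - b)];
     rw [abs_of_nonpos (by omega : c - a ≤ (0:Int)), abs_of_nonpos (by omega : d - b ≤ (0:Int))]] <;>
    omega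

theorem length_cumTail (legs : List (Int × Int × Int × Int)) : ∀ c, (cumTail c legs).length = legs.length := by
  induction legs with
  | nil => intro c; rfl
  | cons g ls ih => intro c; simp [cumTail, ih]

theorem legX_lt (ex sy : Int) : ∀ n (sx time : Int) q, (ex - sx).natAbs = n → sx ≤ ex →
    legX ex sy sx time q =
      (ex, time + (((PySem.List.pyRange sx ex 1).map (fun x => (x, sy))).length : Int),
       q ++ stamp time ((PySem.List.pyRange sx ex 1).map (fun x => (x, sy)))) := by
  intro n
  induction n with
  | zero =>
      intro sx time q hn hle
      have : sx = ex := by omega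
      subst this
      rw [legX]
      simp [PySem.List.pyRange_one_eq_nil le_rfl, stamp]
  | succ n ih =>
      intro sx time q hn hle
      have hlt : sx < ex := by omega
      rw [legX]
      simp only [if_neg (by omega : ¬ sx = ex), if_pos hlt]
      rw [ih (sx + 1) (time + 1) _ (by omega) (by omega)]
      rw [PySem.List.pyRange_one_cons hlt]
      simp [stamp, PySem.List.length_pyRange_one]
      omega

theorem legX_gt (ex sy : Int) : ∀ n (sx time : Int) q, (ex - sx).natAbs = n → ex ≤ sx →
    legX ex sy sx time q =
      (ex, time + (((PySem.List.pyRange sx ex (-1)).map (fun x => (x, sy))).length : Int),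
       q ++ stamp time ((PySem.List.pyRange sx ex (-1)).map (fun x => (x, sy)))) := by
  intro n
  induction n with
  | zero =>
      intro sx time q hn hle
      have : sx = ex := by omega
      subst this
      rw [legX]
      simp [PySem.List.pyRange_neg_one_eq_nil le_rfl, stamp]
  | succ n ih =>
      intro sx time q hn hle
      have hlt : ex < sx := by omega
      rw [legX]
      simp only [if_neg (by omega : ¬ sx = ex), if_neg (by omega : ¬ sx < ex)]
      rw [ih (sx - 1) (time + 1) _ (by omega) (by omega)]
      rw [PySem.List.pyRange_neg_one_cons hlt]
      simp [stamp, PySem.List.length_pyRange_neg_one]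
      omega

theorem legX_eq (ex sy sx time : Int) (q : List (Int × Int × Int)) :
    legX ex sy sx time q =
      (ex, time + (((PySem.List.pyRange sx ex (if ex > sx then 1 else -1)).map (fun x => (x, sy))).length : Int),
       q ++ stamp time ((PySem.List.pyRange sx ex (if ex > sx then 1 else -1)).map (fun x => (x, sy)))) := by
  by_cases h : ex > sx
  · simp only [if_pos h]
    exact legX_lt ex sy _ sx time q rfl (by omega)
  · simp only [if_neg h]
    exact legX_gt ex sy _ sx time q rfl (by omega)

theorem legY_lt (ey sx : Int) : ∀ n (sy time : Int) q, (ey - sy).natAbs = n → sy ≤ ey →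
    legY ey sx sy time q =
      (ey, time + (((PySem.List.pyRange sy ey 1).map (fun y => (sx, y))).length : Int),
       q ++ stamp time ((PySem.List.pyRange sy ey 1).map (fun y => (sx, y)))) := by
  intro n
  induction n with
  | zero =>
      intro sy time q hn hle
      have : sy = ey := by omega
      subst this
      rw [legY]
      simp [PySem.List.pyRange_one_eq_nil le_rfl, stamp]
  | succ n ih =>
      intro sy time q hn hle
      have hlt : sy < ey := by omega
      rw [legY]
      simp only [if_neg (by omega : ¬ sy = ey), if_pos hlt]
      rw [ih (sy + 1) (time + 1) _ (by omega) (by omega)]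
      rw [PySem.List.pyRange_one_cons hlt]
      simp [stamp, PySem.List.length_pyRange_one]
      omega

theorem legY_gt (ey sx : Int) : ∀ n (sy time : Int) q, (ey - sy).natAbs = n → ey ≤ sy →
    legY ey sx sy time q =
      (ey, time + (((PySem.List.pyRange sy ey (-1)).map (fun y => (sx, y))).length : Int),
       q ++ stamp time ((PySem.List.pyRange sy ey (-1)).map (fun y => (sx, y)))) := by
  intro n
  induction n with
  | zero =>
      intro sy time q hn hle
      have : sy = ey := by omega
      subst this
      rw [legY]
      simp [PySem.List.pyRange_neg_one_eq_nil le_rfl, stamp]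
  | succ n ih =>
      intro sy time q hn hle
      have hlt : ey < sy := by omega
      rw [legY]
      simp only [if_neg (by omega : ¬ sy = ey), if_neg (by omega : ¬ sy < ey)]
      rw [ih (sy - 1) (time + 1) _ (by omega) (by omega)]
      rw [PySem.List.pyRange_neg_one_cons hlt]
      simp [stamp, PySem.List.length_pyRange_neg_one]
      omega

theorem legY_eq (ey sx sy time : Int) (q : List (Int × Int × Int)) :
    legY ey sx sy time q =
      (ey, time + (((PySem.List.pyRange sy ey (if ey > sy then 1 else -1)).map (fun y => (sx, y))).length : Int),
       q ++ stamp time ((PySem.List.pyRange sy ey (if ey > sy then 1 else -1)).map (fun y => (sx, y)))) := by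
  by_cases h : ey > sy
  · simp only [if_pos h]
    exact legY_lt ey sx _ sy time q rfl (by omega)
  · simp only [if_neg h]
    exact legY_gt ey sx _ sy time q rfl (by omega)

-- generic: a fold over range(len L) that only reads L[i] is a fold over L
theorem foldl_range_getElem {σ α : Type} (f : σ → Nat → σ) (g : σ → α → σ) (L : List α)
    (h : ∀ (i : Nat) (hi : i < L.length), ∀ st, f st i = g st (L[i]'hi)) :
    ∀ st, (List.range L.length).foldl f st = L.foldl g st := by
  induction L using List.reverseRecOn with
  | nil => intro st; simp
  | append_singleton L x ih =>
      intro st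
      have hL : ∀ (i : Nat) (hi : i < L.length), ∀ st, f st i = g st (L[i]'hi) := by
        intro i hi st
        rw [h i (by simp; omega), List.getElem_append_left hi]
      simp only [List.length_append, List.length_singleton, List.range_succ,
        List.foldl_append, List.foldl_cons, List.foldl_nil]
      rw [ih hL st, h L.length (by simp), List.getElem_concat_length]
      rfl

-- A's pair-fold, in closed form
theorem fold_relA (points : List (Int × Int)) :
    ∀ (ps : List (Int × Int)) (ps0 : List (Int × Int)) (x y : Int),
      ps.foldl (stepAp points) (x, y, (ps0.length : Int), stamp 0 ps0) =
        (((ps.map (legOf points)).getLastD (x, y, x, y)).2.2.1,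
         ((ps.map (legOf points)).getLastD (x, y, x, y)).2.2.2,
         ((ps0 ++ pathOf (ps.map (legOf points))).length : Int),
         stamp 0 (ps0 ++ pathOf (ps.map (legOf points)))) := by
  intro ps
  induction ps with
  | nil => intro ps0 x y; simp [pathOf]
  | cons p ps ih =>
      intro ps0 x y
      have hstep : stepAp points (x, y, (ps0.length : Int), stamp 0 ps0) p =
          ((legOf points p).2.2.1, (legOf points p).2.2.2,
           ((ps0 ++ posList (legOf points p)).length : Int),
           stamp 0 (ps0 ++ posList (legOf points p))) := by
        simp only [stepAp, legOf, posList, legPositions]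
        rw [legX_eq, legY_eq]
        simp only [Prod.mk.injEq, true_and]
        constructor
        · simp only [List.length_append]
          push_cast
          ring
        · rw [stamp_append, stamp_append]
          simp [List.append_assoc]
      rw [List.foldl_cons, hstep,
        ih (ps0 ++ posList (legOf points p)) (legOf points p).2.2.1 (legOf points p).2.2.2]
      have hproj : ∀ (M : List (Int × Int × Int × Int)) (d d' : Int × Int × Int × Int),
          d.2.2 = d'.2.2 → (M.getLastD d).2.2 = (M.getLastD d').2.2 := by
        intro M d d' hd
        cases M with
        | nil => simpa using hd
        | cons a M => rw [List.getLastD_cons, List.getLastD_cons]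
      have hd : ((legOf points p).2.2.1, (legOf points p).2.2.2, (legOf points p).2.2.1,
          (legOf points p).2.2.2).2.2 = (legOf points p).2.2 := rfl
      simp only [List.map_cons, List.getLastD_cons, pathOf, List.flatMap_cons,
        List.append_assoc]
      have h22 := hproj (ps.map (legOf points)) _ _ hd
      rw [show (((List.map (legOf points) ps).getLastD
              ((legOf points p).2.2.1, (legOf points p).2.2.2, (legOf points p).2.2.1,
                (legOf points p).2.2.2)).2.2) =
            ((List.map (legOf points) ps).getLastD (legOf points p)).2.2 from h22]

-- B's building fold, in closed form
theorem fold_relB (points : List (Int × Int)) :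
    ∀ (ps : List (Int × Int)) (L : List (Int × Int × Int × Int)) (C : List Int) (h : C ≠ []),
      ps.foldl (stepB points) (L, C) =
        (L ++ ps.map (legOf points), C ++ cumTail (C.getLast h) (ps.map (legOf points))) := by
  intro ps
  induction ps with
  | nil => intro L C h; simp [cumTail]
  | cons p ps ih =>
      intro L C h
      have hstep : stepB points (L, C) p =
          (L ++ [legOf points p], C ++ [C.getLast h + lenLeg (legOf points p)]) := by
        simp only [stepB, legOf, lenLeg]
        rw [PySem.List.pyGetD_neg_one C 0 h]
        ring_nf
      rw [List.foldl_cons, hstep, ih _ _ (by simp)]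
      have hlast : (C ++ [C.getLast h + lenLeg (legOf points p)]).getLast (by simp) =
          C.getLast h + lenLeg (legOf points p) := List.getLast_concat
      rw [hlast]
      simp [cumTail, List.append_assoc]

theorem cumTail_getLastD (legs : List (Int × Int × Int × Int)) :
    ∀ c, (cumTail c legs).getLastD c = c + ((pathOf legs).length : Int) := by
  induction legs with
  | nil => intro c; simp [cumTail, pathOf]
  | cons g ls ih =>
      intro c
      simp only [cumTail, List.getLastD_cons, ih (c + lenLeg g), pathOf, List.flatMap_cons,
        List.length_append]
      have := length_posList_int g
      push_cast
      omega

theorem cum_getLast (legs : List (Int × Int × Int × Int)) (c : Int) (h : (c :: cumTail c legs) ≠ []) :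
    (c :: cumTail c legs).getLast h = c + ((pathOf legs).length : Int) := by
  rw [List.getLast_eq_getLastD h, cumTail_getLastD]

theorem cum_getD_last (legs : List (Int × Int × Int × Int)) :
    ∀ c d, (c :: cumTail c legs).getD legs.length d = c + ((pathOf legs).length : Int) := by
  induction legs with
  | nil => intro c d; simp [cumTail, pathOf]
  | cons g ls ih =>
      intro c d
      simp only [cumTail, List.length_cons, List.getD_cons_succ, ih (c + lenLeg g) d, pathOf,
        List.flatMap_cons, List.length_append]
      have := length_posList_int g
      push_cast
      omega

theorem cumTail_concat (L : List (Int × Int × Int × Int)) (l : Int × Int × Int × Int) :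
    ∀ c, cumTail c (L ++ [l]) = cumTail c L ++ [c + ((pathOf L).length : Int) + lenLeg l] := by
  induction L with
  | nil => intro c; simp [cumTail, pathOf]
  | cons g M ih =>
      intro c
      simp only [List.cons_append, cumTail, ih (c + lenLeg g), pathOf, List.flatMap_cons,
        List.length_append, List.cons_append]
      have := length_posList_int g
      congr 3
      push_cast
      omega

theorem scanIdx_le (cum : List Int) (t : Int) : ∀ i, scanIdx cum t i ≤ i := by
  intro i
  induction i with
  | zero => simp [scanIdx]
  | succ i ih => rw [scanIdx]; split_ifs <;> omega

theorem scanIdx_prefix (C Y : List Int) (t : Int) :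
    ∀ i, i < C.length → scanIdx (C ++ Y) t i = scanIdx C t i := by
  intro i
  induction i with
  | zero => intro _; rfl
  | succ i ih =>
      intro hi
      rw [scanIdx, scanIdx]
      have hcast : ((i : Int) + 1) = (((i + 1 : Nat)) : Int) := by push_cast; ring
      rw [hcast, PySem.List.pyGetD_natCast, PySem.List.pyGetD_natCast,
        List.getD_append _ _ _ _ hi]
      split_ifs with hc
      · exact ih (by omega)
      · rfl

-- generic indexing of two range-maps plus a final element
theorem getD_two_maps {α : Type} (n1 n2 : Nat) (f1 f2 : Nat → α) (e : α) (d : α) (j : Nat) :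
    (((List.range n1).map f1 ++ (List.range n2).map f2) ++ [e]).getD j d =
      if j < n1 then f1 j
      else if j < n1 + n2 then f2 (j - n1)
      else if j = n1 + n2 then e else d := by
  by_cases h1 : j < n1
  · rw [List.getD_append _ _ _ _ (by simp; omega), List.getD_append _ _ _ _ (by simp; omega),
      PySem.List.getD_map_range f1 n1 j d h1, if_pos h1]
  · rw [if_neg h1]
    by_cases h2 : j < n1 + n2
    · rw [List.getD_append _ _ _ _ (by simp; omega),
        List.getD_append_right _ _ _ _ (by simp; omega)]
      simp only [List.length_map, List.length_range]
      rw [PySem.List.getD_map_range f2 n2 (j - n1) d (by omega), if_pos h2]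
    · rw [if_neg h2, List.getD_append_right _ _ _ _ (by simp; omega)]
      simp only [List.length_append, List.length_map, List.length_range]
      by_cases h3 : j = n1 + n2
      · rw [if_pos h3]
        have : j - (n1 + n2) = 0 := by omega
        rw [this]
        rfl
      · rw [if_neg h3]
        obtain ⟨m, hm⟩ : ∃ m, j - (n1 + n2) = m + 1 := ⟨j - (n1 + n2) - 1, by omega⟩
        rw [hm, List.getD_cons_succ, List.getD_nil]

-- indexing one leg's path-plus-endpoint, closed form (B's pos arithmetic)
theorem leg_getD (sx sy ex ey k : Int) (h0 : 0 ≤ k) (hk : k ≤ |ex - sx| + |ey - sy|) :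
    (legPositions sx sy ex ey ++ [(ex, ey)]).getD k.toNat (0, 0) =
      (if k < |ex - sx| then (sx + (if ex > sx then k else -k), sy)
       else (ex, sy + (if ey > sy then k - |ex - sx| else |ex - sx| - k))) := by
  unfold legPositions
  by_cases hx : ex > sx <;> by_cases hy : ey > sy
  · rw [abs_of_nonneg (by omega : (0:Int) ≤ ex - sx)] at hk ⊢
    rw [abs_of_nonneg (by omega : (0:Int) ≤ ey - sy)] at hk
    simp only [if_pos hx, if_pos hy, PySem.List.pyRange_one, List.map_map]
    rw [getD_two_maps]
    split_ifs <;>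
      simp only [Function.comp_apply, Prod.mk.injEq] <;>
      constructor <;> first | trivial | omega
  · rw [abs_of_nonneg (by omega : (0:Int) ≤ ex - sx)] at hk ⊢
    rw [abs_of_nonpos (by omega : ey - sy ≤ (0:Int))] at hk
    simp only [if_pos hx, if_neg hy, PySem.List.pyRange_one, PySem.List.pyRange_neg_one,
      List.map_map]
    rw [getD_two_maps]
    split_ifs <;>
      simp only [Function.comp_apply, Prod.mk.injEq] <;>
      constructor <;> first | trivial | omega
  · rw [abs_of_nonpos (by omega : ex - sx ≤ (0:Int))] at hk ⊢
    rw [abs_of_nonneg (by omega : (0:Int) ≤ ey - sy)] at hk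
    simp only [if_neg hx, if_pos hy, PySem.List.pyRange_one, PySem.List.pyRange_neg_one,
      List.map_map]
    rw [getD_two_maps]
    split_ifs <;>
      simp only [Function.comp_apply, Prod.mk.injEq] <;>
      constructor <;> first | trivial | omega
  · rw [abs_of_nonpos (by omega : ex - sx ≤ (0:Int))] at hk ⊢
    rw [abs_of_nonpos (by omega : ey - sy ≤ (0:Int))] at hk
    simp only [if_neg hx, if_neg hy, PySem.List.pyRange_neg_one, List.map_map]
    rw [getD_two_maps]
    split_ifs <;>
      simp only [Function.comp_apply, Prod.mk.injEq] <;>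
      constructor <;> first | trivial | omega

-- the leg arithmetic of posB, as a function of the fetched leg and local offset
def posVal (g : Int × Int × Int × Int) (k : Int) : Int × Int :=
  if k < |g.2.2.1 - g.1| then (g.1 + (if g.2.2.1 > g.1 then k else -k), g.2.1)
  else (g.2.2.1, g.2.1 + (if g.2.2.2 > g.2.1 then k - |g.2.2.1 - g.1| else |g.2.2.1 - g.1| - k))

theorem posB_eval (legs : List (Int × Int × Int × Int)) (cum : List Int) (t : Int) :
    posB legs cum t =
      posVal (PySem.List.pyGetD legs ((scanIdx cum t (legs.length - 1) : Nat) : Int) (0, 0, 0, 0))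
        (t - PySem.List.pyGetD cum ((scanIdx cum t (legs.length - 1) : Nat) : Int) 0) := rfl

theorem leg_posVal (sx sy ex ey k : Int) (h0 : 0 ≤ k) (hk : k ≤ |ex - sx| + |ey - sy|) :
    (legPositions sx sy ex ey ++ [(ex, ey)]).getD k.toNat (0, 0) = posVal (sx, sy, ex, ey) k := by
  rw [leg_getD sx sy ex ey k h0 hk]; rfl

-- the key B lemma: pos(t) is the t-th visited position
theorem posB_getD (legs : List (Int × Int × Int × Int)) (hne : legs ≠ []) (t : Int)
    (h0 : 0 ≤ t) (ht : t ≤ ((pathOf legs).length : Int)) :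
    posB legs (0 :: cumTail 0 legs) t = (pathOf legs ++ [endPt legs]).getD t.toNat (0, 0) := by
  revert hne ht
  induction legs using List.reverseRecOn with
  | nil => intro hne _; exact absurd rfl hne
  | append_singleton L l ih =>
      intro _ ht
      by_cases hL : L = []
      · subst hL
        simp only [List.nil_append] at ht ⊢
        have hk : t ≤ |l.2.2.1 - l.1| + |l.2.2.2 - l.2.1| := by
          have h1 := length_posList_int l
          simp only [pathOf, List.flatMap_cons, List.flatMap_nil, List.append_nil] at ht
          unfold lenLeg at h1
          omega
        rw [posB_eval]
        simp only [List.length_cons, List.length_nil, Nat.sub_self, scanIdx, Nat.cast_zero,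
          PySem.List.pyGetD_zero_cons, sub_zero]
        have hres := leg_posVal l.1 l.2.1 l.2.2.1 l.2.2.2 t h0 hk
        simp only [pathOf, List.flatMap_cons, List.flatMap_nil, List.append_nil, endPt,
          List.getLastD_cons, List.getLastD_nil]
        rw [← hres]
        rfl
      · -- L ≠ []
        have hLpos : 0 < L.length := List.length_pos_iff.mpr hL
        obtain ⟨m, hm⟩ : ∃ m, L.length = m + 1 := ⟨L.length - 1, by omega⟩
        have hS : (0:Int) ≤ ((pathOf L).length : Int) := by positivity
        have hcum : cumTail 0 (L ++ [l]) =
            cumTail 0 L ++ [((pathOf L).length : Int) + lenLeg l] := by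
          have h := cumTail_concat L l 0
          simpa using h
        have hCeq : ((0:Int) :: cumTail 0 (L ++ [l])) =
            ((0:Int) :: cumTail 0 L) ++ [((pathOf L).length : Int) + lenLeg l] := by
          rw [hcum]; rfl
        have hClen : ((0:Int) :: cumTail 0 L).length = L.length + 1 := by
          simp [length_cumTail]
        have hpathapp : pathOf (L ++ [l]) = pathOf L ++ posList l := by
          simp [pathOf, List.flatMap_append]
        have hgd : (((0:Int) :: cumTail 0 (L ++ [l]))).getD L.length 0 =
            ((pathOf L).length : Int) := by
          rw [hCeq, List.getD_append _ _ _ _ (by omega)]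
          have h := cum_getD_last L 0 0
          simpa using h
        have hstart : (L ++ [l]).length - 1 = m + 1 := by simp; omega
        rw [posB_eval, hstart, scanIdx]
        have hcast : ((m : Int) + 1) = (((m + 1 : Nat)) : Int) := by push_cast; ring
        rw [hcast]
        simp only [PySem.List.pyGetD_natCast]
        rw [← hm, hgd]
        by_cases hts : ((pathOf L).length : Int) > t
        · -- t falls strictly before leg l: same as posB on L
          rw [if_pos hts, hCeq, scanIdx_prefix _ _ t m (by omega)]
          have hile : scanIdx ((0:Int) :: cumTail 0 L) t m ≤ m := scanIdx_le _ t m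
          set i := scanIdx ((0:Int) :: cumTail 0 L) t m with hidef
          rw [List.getD_append _ _ _ _ (show i < L.length by omega),
            List.getD_append _ _ _ _ (show i < ((0:Int) :: cumTail 0 L).length by omega)]
          have hiback : posB L ((0:Int) :: cumTail 0 L) t =
              posVal (L.getD i (0,0,0,0)) (t - ((0:Int) :: cumTail 0 L).getD i 0) := by
            rw [posB_eval]
            simp only [PySem.List.pyGetD_natCast]
            rw [show L.length - 1 = m by omega, ← hidef]
          rw [← hiback, ih hL (by omega)]
          have htlt : t.toNat < (pathOf L).length := by omega
          rw [hpathapp, List.append_assoc, List.getD_append _ _ _ _ htlt,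
            List.getD_append _ _ _ _ htlt]
        · -- t lands on leg l (or its endpoint)
          rw [if_neg hts]
          rw [show (L ++ [l]).getD L.length (0,0,0,0) = l from by
            rw [List.getD_append_right _ _ _ _ (le_refl _), Nat.sub_self]; rfl]
          rw [hgd]
          have hk2 : t - ((pathOf L).length : Int) ≤ |l.2.2.1 - l.1| + |l.2.2.2 - l.2.1| := by
            have h1 := length_posList_int l
            rw [hpathapp] at ht
            simp only [List.length_append] at ht
            unfold lenLeg at h1
            push_cast at ht
            omega
          rw [← leg_posVal l.1 l.2.1 l.2.2.1 l.2.2.2 (t - ((pathOf L).length : Int))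
            (by omega) hk2]
          have hend : endPt (L ++ [l]) = l.2.2 := by
            unfold endPt
            rw [List.getLastD_concat]
          rw [hend, hpathapp, List.append_assoc,
            List.getD_append_right _ _ _ _ (by omega : (pathOf L).length ≤ t.toNat)]
          have hidx : t.toNat - (pathOf L).length = (t - ((pathOf L).length : Int)).toNat := by
            omega
          rw [hidx]
          rfl

theorem stepA_compat (points : List (Int × Int)) (route : List Int) :
    ∀ (i : Nat) (hi : i < (route.zip (route.drop 1)).length), ∀ st,
      stepA points route st i = stepAp points st ((route.zip (route.drop 1))[i]'hi) := by
  intro i hi st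
  have hlen : i + 1 < route.length := by
    simp only [List.length_zip, List.length_drop] at hi
    omega
  have h1 : PySem.List.pyGetD route (i : Int) 0 = ((route.zip (route.drop 1))[i]'hi).1 := by
    rw [PySem.List.pyGetD_natCast, List.getElem_zip, List.getD_eq_getElem route 0 (by omega)]
  have h2 : PySem.List.pyGetD route ((i : Int) + 1) 0 = ((route.zip (route.drop 1))[i]'hi).2 := by
    rw [show ((i : Int) + 1) = (((i + 1 : Nat)) : Int) by push_cast; ring,
      PySem.List.pyGetD_natCast, List.getElem_zip, List.getElem_drop,
      List.getD_eq_getElem route 0 hlen]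
    congr 1
    omega
  simp only [stepA, stepAp, h1, h2]

-- ===== VERDICT (by name: the statement is the Claim_ definition above) =====
theorem find_best_route_spec : Claim_equal_find_best_route := by
  intro points route _ hpre
  obtain ⟨hlen, _⟩ := hpre
  show find_best_route points route = find_best_route_alt points route
  have hplen : (route.zip (route.drop 1)).length = route.length - 1 := by
    simp only [List.length_zip, List.length_drop]
    omega
  have hlegsne : (route.zip (route.drop 1)).map (legOf points) ≠ [] := by
    simp only [ne_eq, ← List.length_eq_zero_iff, List.length_map, List.length_zip,
      List.length_drop]
    omega
  set pairs := route.zip (route.drop 1) with hpairs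
  set legs := pairs.map (legOf points) with hlegs
  -- A side
  have hA : find_best_route points route = stamp 0 (pathOf legs ++ [endPt legs]) := by
    unfold find_best_route
    rw [show route.length - 1 = pairs.length from hplen.symm,
      foldl_range_getElem (stepA points route) (stepAp points) pairs (stepA_compat points route),
      show ((0:Int), (0:Int), (0:Int), ([] : List (Int × Int × Int))) =
        ((0:Int), (0:Int), ((([] : List (Int × Int)).length : Int)),
          stamp 0 ([] : List (Int × Int))) from by norm_num [stamp],
      fold_relA points pairs [] 0 0]
    simp only [List.nil_append]
    rw [stamp_append 0 (pathOf legs) [endPt legs], ← hlegs]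
    simp [stamp, endPt]
  -- B side
  have htot : PySem.List.pyGetD ((0:Int) :: cumTail 0 legs) (-1) 0 =
      ((pathOf legs).length : Int) := by
    rw [PySem.List.pyGetD_neg_one _ 0 (by simp)]
    have h := cum_getLast legs 0 (by simp)
    simpa using h
  have hB : find_best_route_alt points route = stamp 0 (pathOf legs ++ [endPt legs]) := by
    unfold find_best_route_alt
    rw [fold_relB points pairs [] [0] (by simp)]
    simp only [List.nil_append, List.cons_append, List.nil_append]
    rw [show ([(0:Int)].getLast (by simp)) = (0:Int) from rfl, htot]
    apply List.ext_getElem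
    · simp only [List.length_map, PySem.List.length_pyRange_one, length_stamp,
        List.length_append, List.length_cons, List.length_nil]
      omega
    · intro j h1 h2
      have hjlen : j < (pathOf legs).length + 1 := by
        simp only [length_stamp, List.length_append, List.length_cons, List.length_nil] at h2
        omega
      rw [List.getElem_map, PySem.List.getElem_pyRange_one 0 _ j (by
        simpa using h1)]
      rw [getElem_stamp 0 _ j (by simpa using hjlen)]
      have hpb := posB_getD legs hlegsne (j : Int) (by positivity)
        (by push_cast; omega)
      rw [zero_add]
      rw [hpb, Int.toNat_natCast,
        List.getD_eq_getElem _ _ (by simpa using hjlen)]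
  rw [hA, hB]
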